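-- pv_equiv track=rewrite | github.com/hirokame/TileNet | QBG/Maze_task/bg_network.py | named_arr
-- ===== SOURCE A (Python) =====
-- def named_arr(name, row, col):
--     directions_1 = ["U", "R", "L", "D"]
--     directions_2 = ["U", "R", "L", "D", "S"]
--     tmp_arr = []
--
--     if name == "SNr" or name == "xs":
--         for direction_1 in directions_1:
--             for direction_2 in directions_2:
--                 tmp_arr += [name+str(i)+str(j)+direction_1+direction_2 for i in range(row, col) for j in range(row, col)]
--         return tmp_arr
--
--     else:
--         for direction in directions_1:
--             tmp_arr += [name+str(i)+str(j)+direction for i in range(row, col) for j in range(row, col)]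
--         return tmp_arr
-- ===== SOURCE B (Python) =====
-- def named_arr(name, row, col):
--     # Rank-decoding generation: compute the k-th output string directly from k
--     # by divmod arithmetic, instead of nested loops.
--     n = col - row if col > row else 0
--     sq = n * n
--     d1 = ["U", "R", "L", "D"]
--     if name == "SNr" or name == "xs":
--         d2 = ["U", "R", "L", "D", "S"]
--         def build(k):
--             q, p = divmod(k, sq)
--             a, b = divmod(q, 5)
--             i, j = divmod(p, n)
--             return name + str(row + i) + str(row + j) + d1[a] + d2[b]
--         return [build(k) for k in range(20 * sq)]
--     def build(k):
--         d, p = divmod(k, sq)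
--         i, j = divmod(p, n)
--         return name + str(row + i) + str(row + j) + d1[d]
--     return [build(k) for k in range(4 * sq)]
-- ===== Notes on version B (the rewrite author's own statement) =====
-- stated objective: alternative
-- what changed: B replaces A's nested direction/position loops with rank decoding: it enumerates a single flat index k over the total count and reconstructs the i, j and direction components of the k-th string by divmod arithmetic.
import Mathlib
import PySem

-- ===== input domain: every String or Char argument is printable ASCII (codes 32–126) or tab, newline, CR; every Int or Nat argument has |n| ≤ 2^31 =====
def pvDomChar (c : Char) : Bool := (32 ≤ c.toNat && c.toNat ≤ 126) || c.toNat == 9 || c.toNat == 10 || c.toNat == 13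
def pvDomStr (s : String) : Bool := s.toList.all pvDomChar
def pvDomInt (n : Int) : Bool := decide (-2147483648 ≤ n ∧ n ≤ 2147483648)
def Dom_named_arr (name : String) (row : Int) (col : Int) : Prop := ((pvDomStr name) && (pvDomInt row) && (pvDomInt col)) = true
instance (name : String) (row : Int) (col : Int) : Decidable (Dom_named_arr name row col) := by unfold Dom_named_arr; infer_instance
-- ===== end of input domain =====

-- B generates the k-th output string directly from a flat rank k by divmod decoding, instead of A's nested direction/position loops (alternative algorithm, same values and order).


-- ===== PORT A =====
-- literal transliteration: accumulator tmp_arr, '+=' of the nested-range comprehension per direction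
def named_arr (name : String) (row : Int) (col : Int) : List String :=
  let directions_1 : List String := ["U", "R", "L", "D"]
  let directions_2 : List String := ["U", "R", "L", "D", "S"]
  let tmp_arr : List String := []
  if name == "SNr" || name == "xs" then
    directions_1.foldl (fun acc direction_1 =>
      directions_2.foldl (fun acc direction_2 =>
        acc ++ (PySem.List.pyRange row col 1).flatMap (fun i =>
          (PySem.List.pyRange row col 1).map (fun j =>
            name ++ PySem.Int.toStr i ++ PySem.Int.toStr j ++ direction_1 ++ direction_2))) acc) tmp_arr
  else
    directions_1.foldl (fun acc direction =>
      acc ++ (PySem.List.pyRange row col 1).flatMap (fun i =>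
        (PySem.List.pyRange row col 1).map (fun j =>
          name ++ PySem.Int.toStr i ++ PySem.Int.toStr j ++ direction))) tmp_arr

-- ===== PORT B =====
-- literal transliteration of Source B: one flat index k over the total count, divmod decoding of (direction, i, j).
-- The list indices d1[a]/d2[b] are always in range (by the divmod bounds), so Python never raises; '.getD ""' is never taken.
def named_arr_alt (name : String) (row : Int) (col : Int) : List String :=
  let n : Int := if col > row then col - row else 0
  let sq : Int := n * n
  let d1 : List String := ["U", "R", "L", "D"]
  if name == "SNr" || name == "xs" then
    let d2 : List String := ["U", "R", "L", "D", "S"]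
    (PySem.List.pyRange 0 (20 * sq) 1).map (fun k =>
      let q := PySem.Int.floordiv k sq
      let p := PySem.Int.mod k sq
      let a := PySem.Int.floordiv q 5
      let b := PySem.Int.mod q 5
      let i := PySem.Int.floordiv p n
      let j := PySem.Int.mod p n
      name ++ PySem.Int.toStr (row + i) ++ PySem.Int.toStr (row + j)
        ++ (PySem.List.pyGet? d1 a).getD "" ++ (PySem.List.pyGet? d2 b).getD "")
  else
    (PySem.List.pyRange 0 (4 * sq) 1).map (fun k =>
      let d := PySem.Int.floordiv k sq
      let p := PySem.Int.mod k sq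
      let i := PySem.Int.floordiv p n
      let j := PySem.Int.mod p n
      name ++ PySem.Int.toStr (row + i) ++ PySem.Int.toStr (row + j)
        ++ (PySem.List.pyGet? d1 d).getD "")

-- ===== PRECONDITION & SPEC =====
def Spec_named_arr (name : String) (row : Int) (col : Int) (out : List String) : Prop := out = named_arr_alt name row col
instance (name : String) (row : Int) (col : Int) (out : List String) : Decidable (Spec_named_arr name row col out) := by unfold Spec_named_arr; infer_instance

-- ===== CLAIM (what is proved, stated in full; the proofs are below) =====
def Claim_equal_named_arr : Prop := ∀ (name : String) (row : Int) (col : Int), Dom_named_arr name row col → Spec_named_arr name row col (named_arr name row col)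

-- ===== LEMMAS AND PROOFS =====

-- rank decoding over a product range: mapping divmod decoding over range (m*k) is the nested flatMap
theorem range_mul_map {α : Type} (m k : Nat) (g : Nat → Nat → α) :
    (List.range (m * k)).map (fun t => g (t / k) (t % k)) =
    (List.range m).flatMap (fun q => (List.range k).map (fun r => g q r)) := by
  induction m with
  | zero => simp
  | succ m ih =>
    rw [List.range_succ, Nat.succ_mul, List.range_add, List.map_append, ih,
        List.flatMap_append]
    congr 1
    simp only [List.flatMap_cons, List.flatMap_nil, List.append_nil, List.map_map]
    apply List.map_congr_left
    intro t ht
    simp only [List.mem_range] at ht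
    have hk : 0 < k := Nat.pos_of_ne_zero (by omega)
    have h1 : (m * k + t) / k = m := by
      rw [Nat.mul_comm, Nat.mul_add_div hk, Nat.div_eq_of_lt ht]
      omega
    have h2 : (m * k + t) % k = t := by
      rw [Nat.mul_comm, Nat.mul_add_mod, Nat.mod_eq_of_lt ht]
    simp [Function.comp, h1, h2]

-- first-order specializations of range_mul_map for the two body shapes (one / two direction suffixes)
theorem outer_decode1 (name : String) (row : Int) (N : Nat) :
    (List.range (4 * (N * N))).map (fun t =>
      name ++ PySem.Int.toStr (row + ((t % (N * N) / N : Nat) : Int))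
        ++ PySem.Int.toStr (row + ((t % (N * N) % N : Nat) : Int))
        ++ (PySem.List.pyGet? ["U", "R", "L", "D"] ((t / (N * N) : Nat) : Int)).getD "") =
    (List.range 4).flatMap (fun q => (List.range (N * N)).map (fun p =>
      name ++ PySem.Int.toStr (row + ((p / N : Nat) : Int))
        ++ PySem.Int.toStr (row + ((p % N : Nat) : Int))
        ++ (PySem.List.pyGet? ["U", "R", "L", "D"] ((q : Nat) : Int)).getD "")) :=
  range_mul_map 4 (N * N) (fun q p =>
    name ++ PySem.Int.toStr (row + ((p / N : Nat) : Int))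
      ++ PySem.Int.toStr (row + ((p % N : Nat) : Int))
      ++ (PySem.List.pyGet? ["U", "R", "L", "D"] ((q : Nat) : Int)).getD "")

theorem outer_decode2 (name : String) (row : Int) (N : Nat) :
    (List.range (20 * (N * N))).map (fun t =>
      name ++ PySem.Int.toStr (row + ((t % (N * N) / N : Nat) : Int))
        ++ PySem.Int.toStr (row + ((t % (N * N) % N : Nat) : Int))
        ++ (PySem.List.pyGet? ["U", "R", "L", "D"] ((t / (N * N) / 5 : Nat) : Int)).getD ""
        ++ (PySem.List.pyGet? ["U", "R", "L", "D", "S"] ((t / (N * N) % 5 : Nat) : Int)).getD "") =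
    (List.range 20).flatMap (fun q => (List.range (N * N)).map (fun p =>
      name ++ PySem.Int.toStr (row + ((p / N : Nat) : Int))
        ++ PySem.Int.toStr (row + ((p % N : Nat) : Int))
        ++ (PySem.List.pyGet? ["U", "R", "L", "D"] ((q / 5 : Nat) : Int)).getD ""
        ++ (PySem.List.pyGet? ["U", "R", "L", "D", "S"] ((q % 5 : Nat) : Int)).getD "")) :=
  range_mul_map 20 (N * N) (fun q p =>
    name ++ PySem.Int.toStr (row + ((p / N : Nat) : Int))
      ++ PySem.Int.toStr (row + ((p % N : Nat) : Int))
      ++ (PySem.List.pyGet? ["U", "R", "L", "D"] ((q / 5 : Nat) : Int)).getD ""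
      ++ (PySem.List.pyGet? ["U", "R", "L", "D", "S"] ((q % 5 : Nat) : Int)).getD "")

theorem block_decode1 (name : String) (row : Int) (N : Nat) (s : String) :
    (List.range (N * N)).map (fun p =>
      name ++ PySem.Int.toStr (row + ((p / N : Nat) : Int))
        ++ PySem.Int.toStr (row + ((p % N : Nat) : Int)) ++ s) =
    (List.range N).flatMap (fun (i : Nat) => (List.range N).map (fun (j : Nat) =>
      name ++ PySem.Int.toStr (row + (i : Int)) ++ PySem.Int.toStr (row + (j : Int)) ++ s)) :=
  range_mul_map N N (fun i j =>
    name ++ PySem.Int.toStr (row + (i : Int)) ++ PySem.Int.toStr (row + (j : Int)) ++ s)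

theorem block_decode2 (name : String) (row : Int) (N : Nat) (s s' : String) :
    (List.range (N * N)).map (fun p =>
      name ++ PySem.Int.toStr (row + ((p / N : Nat) : Int))
        ++ PySem.Int.toStr (row + ((p % N : Nat) : Int)) ++ s ++ s') =
    (List.range N).flatMap (fun (i : Nat) => (List.range N).map (fun (j : Nat) =>
      name ++ PySem.Int.toStr (row + (i : Int)) ++ PySem.Int.toStr (row + (j : Int)) ++ s ++ s')) :=
  range_mul_map N N (fun i j =>
    name ++ PySem.Int.toStr (row + (i : Int)) ++ PySem.Int.toStr (row + (j : Int)) ++ s ++ s')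

-- cast-pushed variants of the block lemmas (the shape the default simp set leaves)
theorem block_decode1' (name : String) (row : Int) (N : Nat) (s : String) :
    (List.range (N * N)).map (fun (p : Nat) =>
      name ++ PySem.Int.toStr (row + (p : Int) / (N : Int))
        ++ PySem.Int.toStr (row + (p : Int) % (N : Int)) ++ s) =
    (List.range N).flatMap (fun (i : Nat) => (List.range N).map (fun (j : Nat) =>
      name ++ PySem.Int.toStr (row + (i : Int)) ++ PySem.Int.toStr (row + (j : Int)) ++ s)) := by
  simpa using block_decode1 name row N s

theorem block_decode2' (name : String) (row : Int) (N : Nat) (s s' : String) :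
    (List.range (N * N)).map (fun (p : Nat) =>
      name ++ PySem.Int.toStr (row + (p : Int) / (N : Int))
        ++ PySem.Int.toStr (row + (p : Int) % (N : Int)) ++ s ++ s') =
    (List.range N).flatMap (fun (i : Nat) => (List.range N).map (fun (j : Nat) =>
      name ++ PySem.Int.toStr (row + (i : Int)) ++ PySem.Int.toStr (row + (j : Int)) ++ s ++ s')) := by
  simpa using block_decode2 name row N s s'

-- ===== VERDICT (by name: the statement is the Claim_ definition above) =====
theorem named_arr_spec : Claim_equal_named_arr := by
  intro name row col _
  unfold Spec_named_arr named_arr named_arr_alt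
  have hn : (if col > row then col - row else 0) = (((col - row).toNat : Nat) : Int) := by
    split <;> omega
  set N : Nat := (col - row).toNat with hN
  by_cases h : (name == "SNr" || name == "xs") = true
  · simp only [h, if_true, hn]
    rw [PySem.List.pyRange_one row col, PySem.List.pyRange_one 0]
    have hc : ((20 : Int) * ((N : Int) * (N : Int)) - 0).toNat = 20 * (N * N) := by
      have h' : ((20 : Int) * ((N : Int) * (N : Int)) - 0) = ((20 * (N * N) : Nat) : Int) := by
        push_cast; ring
      rw [h', Int.toNat_natCast]
    rw [hc]
    simp only [List.map_map, Function.comp_def, zero_add,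
      show (5 : Int) = ((5 : Nat) : Int) from rfl, ← Nat.cast_mul,
      PySem.Int.floordiv_natCast, PySem.Int.mod_natCast]
    rw [outer_decode2]
    simp [List.range_succ, block_decode2', List.flatMap_map, List.append_assoc, ← hN]
  · simp only [h, Bool.false_eq_true, if_false, hn]
    rw [PySem.List.pyRange_one row col, PySem.List.pyRange_one 0]
    have hc : ((4 : Int) * ((N : Int) * (N : Int)) - 0).toNat = 4 * (N * N) := by
      have h' : ((4 : Int) * ((N : Int) * (N : Int)) - 0) = ((4 * (N * N) : Nat) : Int) := by
        push_cast; ring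
      rw [h', Int.toNat_natCast]
    rw [hc]
    simp only [List.map_map, Function.comp_def, zero_add, ← Nat.cast_mul,
      PySem.Int.floordiv_natCast, PySem.Int.mod_natCast]
    rw [outer_decode1]
    simp [List.range_succ, block_decode1', List.flatMap_map, List.append_assoc, ← hN]
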